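-- pv_equiv track=rewrite | github.com/alehdezp/alphaswarm-sol | tests/test_rename_resistance.py | _extract_semantic_properties
-- ===== SOURCE A (Python) =====
-- def _extract_semantic_properties(props: dict) -> dict:
--     """Extract semantic properties that should be name-agnostic."""
--     semantic_keys = [
--         "has_access_gate",
--         "has_reentrancy_guard",
--         "state_write_after_external_call",
--         "has_unbounded_loop",
--         "has_external_calls",
--         "is_value_transfer",
--         "payable",
--         "visibility",
--         "writes_state",
--         "reads_state",
--         "has_loops",
--         "has_internal_calls",
--         "uses_msg_sender",
--         "uses_erc20_transfer",
--         "semantic_ops",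
--         "behavioral_signature",
--     ]
--     return {k: props.get(k) for k in semantic_keys if k in props}
-- ===== SOURCE B (Python) =====
-- _SEMANTIC_RANK = {
--     k: i
--     for i, k in enumerate(
--         (
--             "has_access_gate",
--             "has_reentrancy_guard",
--             "state_write_after_external_call",
--             "has_unbounded_loop",
--             "has_external_calls",
--             "is_value_transfer",
--             "payable",
--             "visibility",
--             "writes_state",
--             "reads_state",
--             "has_loops",
--             "has_internal_calls",
--             "uses_msg_sender",
--             "uses_erc20_transfer",
--             "semantic_ops",
--             "behavioral_signature",
--         )
--     )
-- }
--
--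
-- def _extract_semantic_properties(props: dict) -> dict:
--     """Extract semantic properties that should be name-agnostic."""
--     semantic = [item for item in props.items() if item[0] in _SEMANTIC_RANK]
--     # present the keys in the canonical order, independent of input order
--     return dict(sorted(semantic, key=lambda item: _SEMANTIC_RANK[item[0]]))
-- ===== Notes on version B (the rewrite author's own statement) =====
-- stated objective: alternative
-- what changed: A probes the dict once per fixed semantic key; B makes one filtering pass over the dict's items against a precomputed rank table and then stable-sorts the survivors into the canonical key order; Pre_ restricts the association list to distinct keys, the only lists that represent a Python dict.
import Mathlib
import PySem

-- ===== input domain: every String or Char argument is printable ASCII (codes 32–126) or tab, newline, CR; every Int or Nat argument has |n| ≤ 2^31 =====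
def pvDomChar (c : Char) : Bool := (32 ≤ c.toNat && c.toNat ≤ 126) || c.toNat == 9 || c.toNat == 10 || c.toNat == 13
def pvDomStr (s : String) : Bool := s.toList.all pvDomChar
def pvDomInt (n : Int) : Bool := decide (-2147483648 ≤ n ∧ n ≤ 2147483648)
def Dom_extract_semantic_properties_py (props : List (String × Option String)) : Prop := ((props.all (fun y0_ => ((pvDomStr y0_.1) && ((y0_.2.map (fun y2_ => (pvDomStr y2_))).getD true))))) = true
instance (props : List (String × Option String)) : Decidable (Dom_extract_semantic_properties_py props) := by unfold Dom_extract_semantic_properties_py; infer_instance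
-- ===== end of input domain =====

-- B replaces A's probe of props for each fixed semantic key by one filtering pass over the
-- dict's items followed by a stable sort into the canonical key order: an alternative
-- traversal of the same data, similar cost.

-- ===== PORT A =====
def semanticKeys : List String :=
  ["has_access_gate", "has_reentrancy_guard", "state_write_after_external_call",
   "has_unbounded_loop", "has_external_calls", "is_value_transfer", "payable",
   "visibility", "writes_state", "reads_state", "has_loops", "has_internal_calls",
   "uses_msg_sender", "uses_erc20_transfer", "semantic_ops", "behavioral_signature"]

-- {k: props.get(k) for k in semantic_keys if k in props}; the comprehension's keys are
-- the distinct semantic keys, so the result dict is the appended association list.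
def extract_semantic_properties_py (props : List (String × Option String)) : List (String × Option String) :=
  semanticKeys.foldl
    (fun acc k =>
      match (PySem.Dict.mk props).get? k with
      | some v => acc ++ [(k, v)]
      | none => acc)
    []

-- ===== PORT B =====
-- _SEMANTIC_RANK = {k: i for i, k in enumerate((...))}
def semanticRank : PySem.Dict String Int :=
  PySem.Dict.mk
    [("has_access_gate", 0), ("has_reentrancy_guard", 1), ("state_write_after_external_call", 2),
     ("has_unbounded_loop", 3), ("has_external_calls", 4), ("is_value_transfer", 5), ("payable", 6),
     ("visibility", 7), ("writes_state", 8), ("reads_state", 9), ("has_loops", 10),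
     ("has_internal_calls", 11), ("uses_msg_sender", 12), ("uses_erc20_transfer", 13),
     ("semantic_ops", 14), ("behavioral_signature", 15)]

-- semantic = [item for item in props.items() if item[0] in _SEMANTIC_RANK]
-- return dict(sorted(semantic, key=lambda item: _SEMANTIC_RANK[item[0]]))
-- The sort key _SEMANTIC_RANK[item[0]] is ported as getD _ 0: every filtered item's key is
-- in the table, so the lookup never falls through to the default (exact on those inputs);
-- the sorted items have distinct keys, so the result dict is that sorted association list.
def extract_semantic_properties_py_alt (props : List (String × Option String)) : List (String × Option String) :=
  PySem.List.sorted
    (props.filter (fun item => semanticRank.contains item.1))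
    (fun item => semanticRank.getD item.1 0) false

-- ===== PRECONDITION & SPEC =====
-- Pre_ restricts the association list to pairwise-distinct keys: exactly the lists that
-- represent a Python dict (A's parameter is a dict, which cannot carry duplicate keys).
def Pre_extract_semantic_properties_py (props : List (String × Option String)) : Prop :=
  (props.map Prod.fst).Nodup
instance (props : List (String × Option String)) : Decidable (Pre_extract_semantic_properties_py props) := by unfold Pre_extract_semantic_properties_py; infer_instance

def pvWitness_extract_semantic_properties_py : (List (String × Option String)) :=
  [("payable", some "true"), ("name", none), ("reads_state", some "x")]

def Spec_extract_semantic_properties_py (props : List (String × Option String)) (out : List (String × Option String)) : Prop := out = extract_semantic_properties_py_alt props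
instance (props : List (String × Option String)) (out : List (String × Option String)) : Decidable (Spec_extract_semantic_properties_py props out) := by unfold Spec_extract_semantic_properties_py; infer_instance

-- ===== CLAIM (what is proved, stated in full; the proofs are below) =====
def Claim_equal_extract_semantic_properties_py : Prop := ∀ (props : List (String × Option String)), Dom_extract_semantic_properties_py props → Pre_extract_semantic_properties_py props → Spec_extract_semantic_properties_py props (extract_semantic_properties_py props)

-- ===== LEMMAS AND PROOFS =====

-- A's loop, written as a filterMap over the fixed key list
lemma foldl_emit_eq_filterMap (l : List String) (f : String → Option (Option String))
    (acc : List (String × Option String)) :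
    l.foldl (fun acc k => match f k with | some v => acc ++ [(k, v)] | none => acc) acc
      = acc ++ l.filterMap (fun k => (f k).map (fun v => (k, v))) := by
  induction l generalizing acc with
  | nil => simp
  | cons k rest ih =>
    cases h : f k <;> simp [List.foldl_cons, h, ih]

-- membership in A's output
lemma mem_A_out (props : List (String × Option String)) (x : String × Option String) :
    x ∈ semanticKeys.filterMap (fun k => ((PySem.Dict.mk props).get? k).map (fun v => (k, v)))
      ↔ x.1 ∈ semanticKeys ∧ (PySem.Dict.mk props).get? x.1 = some x.2 := by
  obtain ⟨k, v⟩ := x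
  simp only [List.mem_filterMap, Option.map_eq_some_iff, Prod.mk.injEq]
  constructor
  · rintro ⟨a, ha, v', hv', rfl, rfl⟩; exact ⟨ha, hv'⟩
  · rintro ⟨hk, hv⟩; exact ⟨k, hk, v, hv, rfl, rfl⟩

-- the rank table contains exactly the semantic keys
lemma contains_rank_iff (k : String) :
    semanticRank.contains k = true ↔ k ∈ semanticKeys := by
  simp [semanticRank, semanticKeys, PySem.Dict.contains_mk]
  tauto

-- keys of the literal dict on props
lemma keys_mk_props (props : List (String × Option String)) :
    (PySem.Dict.mk props).keys = props.map Prod.fst := by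
  simp [PySem.Dict.keys]

-- A's output keys have strictly increasing ranks along semanticKeys
lemma rank_pairwise :
    semanticKeys.Pairwise (fun a b => semanticRank.getD a 0 < semanticRank.getD b 0) := by
  decide

-- ===== VERDICT (by name: the statement is the Claim_ definition above) =====
set_option maxHeartbeats 1000000 in
theorem extract_semantic_properties_py_spec : Claim_equal_extract_semantic_properties_py := by
  intro props _ hpre
  unfold Spec_extract_semantic_properties_py
  unfold extract_semantic_properties_py extract_semantic_properties_py_alt
  rw [foldl_emit_eq_filterMap, List.nil_append]
  set f : String → Option (String × Option String) :=
    fun k => ((PySem.Dict.mk props).get? k).map (fun v => (k, v)) with hf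
  have hkeymem : ∀ k b, b ∈ f k → b.1 = k := by
    rintro k b hb
    simp only [hf, Option.mem_def, Option.map_eq_some_iff] at hb
    obtain ⟨v, _, rfl⟩ := hb; rfl
  have hndkeys : (PySem.Dict.mk props).keys.Nodup := by rw [keys_mk_props]; exact hpre
  have hndA : (semanticKeys.filterMap f).Nodup := by
    apply List.Nodup.filterMap
    · intro a a' b hb hb'
      rw [← hkeymem a b hb, ← hkeymem a' b hb']
    · decide
  have hndprops : props.Nodup := hpre.of_map
  have hndF : (props.filter (fun item => semanticRank.contains item.1)).Nodup :=
    hndprops.filter _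
  have hperm : (semanticKeys.filterMap f).Perm
      (props.filter (fun item => semanticRank.contains item.1)) := by
    rw [List.perm_ext_iff_of_nodup hndA hndF]
    intro x
    rw [mem_A_out, List.mem_filter, contains_rank_iff]
    constructor
    · rintro ⟨hk, hg⟩
      exact ⟨(PySem.Dict.get?_eq_some_iff_mem_items _ _ _ hndkeys).1 hg, hk⟩
    · rintro ⟨hm, hk⟩
      exact ⟨hk, (PySem.Dict.get?_eq_some_iff_mem_items _ _ _ hndkeys).2 hm⟩
  have hpw : (semanticKeys.filterMap f).Pairwise
      (fun a b => semanticRank.getD a.1 0 < semanticRank.getD b.1 0) := by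
    rw [List.pairwise_filterMap]
    refine rank_pairwise.imp_of_mem ?_
    intro a a' _ _ hlt b hb b' hb'
    rw [hkeymem a b hb, hkeymem a' b' hb']
    exact hlt
  exact (PySem.List.sorted_eq_of_perm_of_pairwise_lt _ _ _ hperm hpw).symm
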